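-- pv_equiv track=rewrite | github.com/ericabertan/interview-kit | dictionaries-and-hashmaps/sherlock_and_anagrams.py | identifyAnagrams
-- ===== SOURCE A (Python) =====
-- def sortWord(word):
--     sorted_string_array = sorted(word)
--     return ''.join(sorted_string_array)
--
-- def identifyAnagrams(substrings):
--     dict_count = {}
--     for sub in substrings:
--         sub = sortWord(sub)
--         if dict_count.get(sub) is None:
--             dict_count[sub] = 1
--         else:
--             dict_count[sub] += 1
--     return dict_count
-- ===== SOURCE B (Python) =====
-- def sortWord(word):
--     return ''.join(sorted(word))
--
-- def identifyAnagrams(substrings):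
--     keys = [sortWord(s) for s in substrings]
--     order = list(dict.fromkeys(keys))
--     return {k: keys.count(k) for k in order}
-- ===== Notes on version B (the rewrite author's own statement) =====
-- stated objective: alternative
-- what changed: Replaces the single-pass dict with incremental get/increment by a two-phase plan: materialise all sorted-character keys, dedupe them in first-occurrence order with dict.fromkeys, and build the result in one comprehension using list.count per distinct key.
import Mathlib
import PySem

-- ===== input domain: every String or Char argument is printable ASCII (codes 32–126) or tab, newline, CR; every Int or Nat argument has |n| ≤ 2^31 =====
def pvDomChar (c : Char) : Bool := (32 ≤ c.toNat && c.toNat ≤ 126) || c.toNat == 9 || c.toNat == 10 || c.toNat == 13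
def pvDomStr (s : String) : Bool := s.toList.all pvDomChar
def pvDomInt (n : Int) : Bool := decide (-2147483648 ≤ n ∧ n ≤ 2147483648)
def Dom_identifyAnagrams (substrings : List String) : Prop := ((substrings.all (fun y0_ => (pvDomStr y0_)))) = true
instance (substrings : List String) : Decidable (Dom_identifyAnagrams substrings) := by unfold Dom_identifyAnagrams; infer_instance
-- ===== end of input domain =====

-- B replaces A's incremental dict counting by: map to sorted-char keys, ordered dedup, then one count per distinct key (alternative decomposition, not faster).

-- ===== PORT A =====
-- sortWord: ''.join(sorted(word)); sorted over chars, String.ofList is the List Char → String bridge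
def sortWordA (word : String) : String :=
  String.ofList (PySem.List.sorted word.toList (fun c => c) false)

def identifyAnagrams (substrings : List String) : List (String × Int) :=
  (substrings.foldl (fun dict_count sub =>
      let sub' := sortWordA sub
      match dict_count.get? sub' with
      | none   => dict_count.insert sub' 1
      | some v => dict_count.insert sub' (v + 1))
    (PySem.Dict.empty : PySem.Dict String Int)).items

-- ===== PORT B =====
def sortWordB (word : String) : String :=
  String.ofList (PySem.List.sorted word.toList (fun c => c) false)

def identifyAnagrams_alt (substrings : List String) : List (String × Int) :=
  let keys := substrings.map sortWordB
  let order := PySem.List.dedup keys          -- list(dict.fromkeys(keys))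
  -- the dict comprehension {k: keys.count(k) for k in order}
  (order.foldl (fun d k => d.insert k ((keys.count k : Int)))
    (PySem.Dict.empty : PySem.Dict String Int)).items

-- ===== PRECONDITION & SPEC =====
def Spec_identifyAnagrams (substrings : List String) (out : List (String × Int)) : Prop := out = identifyAnagrams_alt substrings
instance (substrings : List String) (out : List (String × Int)) : Decidable (Spec_identifyAnagrams substrings out) := by unfold Spec_identifyAnagrams; infer_instance

-- ===== CLAIM (what is proved, stated in full; the proofs are below) =====
def Claim_equal_identifyAnagrams : Prop := ∀ (substrings : List String), Dom_identifyAnagrams substrings → Spec_identifyAnagrams substrings (identifyAnagrams substrings)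

-- ===== LEMMAS AND PROOFS =====

-- A's branch on get? is exactly "insert current count + 1"
theorem stepA_eq (d : PySem.Dict String Int) (s : String) :
    (match d.get? s with
     | none   => d.insert s 1
     | some v => d.insert s (v + 1)) = d.insert s (d.getD s 0 + 1) := by
  rcases h : d.get? s with _ | v <;>
    simp [PySem.Dict.getD_eq_get?_getD, h]

-- ===== VERDICT (by name: the statement is the Claim_ definition above) =====
theorem identifyAnagrams_spec : Claim_equal_identifyAnagrams := by
  intro substrings _
  unfold Spec_identifyAnagrams identifyAnagrams identifyAnagrams_alt
  have hA : (substrings.foldl (fun dict_count sub =>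
      let sub' := sortWordA sub
      match dict_count.get? sub' with
      | none   => dict_count.insert sub' 1
      | some v => dict_count.insert sub' (v + 1))
      (PySem.Dict.empty : PySem.Dict String Int))
      = PySem.Dict.counter (substrings.map sortWordA) := by
    rw [← PySem.Dict.foldl_insert_getD_add_one_eq_counter, List.foldl_map]
    congr 1
    funext d s
    exact stepA_eq d (sortWordA s)
  rw [hA, PySem.Dict.items_counter]
  show _ = ((PySem.List.dedup (substrings.map sortWordB)).foldl
      (fun d k => d.insert k (((substrings.map sortWordB).count k : Int)))
      (PySem.Dict.empty : PySem.Dict String Int)).items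
  have hB := PySem.Dict.items_foldl_insert_fresh
      (l := PySem.List.dedup (substrings.map sortWordB)) (k := fun x => x)
      (v := fun x => (((substrings.map sortWordB).count x : Int)))
      (PySem.Dict.empty : PySem.Dict String Int)
      (fun a _ => PySem.Dict.contains_empty a)
      (by simpa using PySem.List.nodup_dedup (substrings.map sortWordB))
  refine Eq.symm (hB.trans ?_)
  simp [show sortWordB = sortWordA from rfl, PySem.Dict.empty]
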